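-- pv_equiv track=rewrite | github.com/bjmedina/memory | utls/toy_experiments.py | infer_trial_isis
-- ===== SOURCE A (Python) =====
-- def infer_trial_isis(sequence):
--     """Return the ISI for each repeat (target) trial in a sequence.
--
--     Assumes each stimulus appears at most twice.  ISI = repeat_position -
--     first_position - 1.
--
--     Parameters
--     ----------
--     sequence : list
--         Ordered stimulus identifiers (file paths, etc.).
--
--     Returns
--     -------
--     list[int]
--         One ISI value per repeat trial, in sequence order.
--         First-presentation (foil) trials are not included.
--     """
--     first_seen = {}
--     trial_isis = []
--     for i, stim in enumerate(sequence):
--         if stim in first_seen: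
--             trial_isis.append(i - first_seen[stim] - 1)
--         else:
--             first_seen[stim] = i
--     return trial_isis
-- ===== SOURCE B (Python) =====
-- def infer_trial_isis(sequence):
--     """Two-pass re-implementation: build a first-occurrence index table,
--     then emit i - first[stim] - 1 for every non-first occurrence, in order."""
--     first = {}
--     for i, stim in enumerate(sequence):
--         if stim not in first:
--             first[stim] = i
--     return [i - first[stim] - 1 for i, stim in enumerate(sequence) if first[stim] != i]
-- ===== Notes on version B (the rewrite author's own statement) =====
-- stated objective: alternative
-- what changed: A maintains the first-seen dict and emits ISIs in one interleaved loop; B first builds the complete first-occurrence index table in one pass and then emits ISIs with a separate filtered comprehension over enumerate, testing first-index inequality so every repeat occurrence (3+ appearances included) is covered.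
import Mathlib
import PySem

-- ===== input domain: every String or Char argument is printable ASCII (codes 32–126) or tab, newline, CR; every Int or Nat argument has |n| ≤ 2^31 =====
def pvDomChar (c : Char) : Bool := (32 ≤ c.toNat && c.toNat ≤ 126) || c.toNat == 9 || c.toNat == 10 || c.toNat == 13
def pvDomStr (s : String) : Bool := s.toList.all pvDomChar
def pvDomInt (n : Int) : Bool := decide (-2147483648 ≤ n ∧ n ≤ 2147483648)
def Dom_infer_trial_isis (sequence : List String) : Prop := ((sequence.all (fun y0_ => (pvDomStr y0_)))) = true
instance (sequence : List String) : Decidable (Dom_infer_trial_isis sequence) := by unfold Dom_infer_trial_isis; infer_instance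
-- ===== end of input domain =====

-- ===== PORT A =====
def infer_trial_isis_aux : List (Int × String) → PySem.Dict String Int → List Int → List Int
  | [], _, acc => acc
  | (i, stim) :: rest, seen, acc =>
    match seen.get? stim with
    | some v => infer_trial_isis_aux rest seen (acc ++ [i - v - 1])
    | none => infer_trial_isis_aux rest (seen.insert stim i) acc

-- port of A: one interleaved loop maintaining first_seen and appending ISIs
def infer_trial_isis (sequence : List String) : List Int :=
  infer_trial_isis_aux (PySem.List.enumerate sequence 0) PySem.Dict.empty []

-- ===== PORT B =====
-- B pass 1: build the complete first-occurrence table ('if stim not in first: first[stim] = i')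
def buildFirst : List (Int × String) → PySem.Dict String Int → PySem.Dict String Int
  | [], d => d
  | (i, s) :: rest, d => buildFirst rest (if d.contains s then d else d.insert s i)

-- port of B: table pass, then a filtered comprehension.  first[stim] is ported as
-- getD _ 0, exact here because every stimulus of the sequence is a key of the table.
def infer_trial_isis_alt (sequence : List String) : List Int :=
  let first := buildFirst (PySem.List.enumerate sequence 0) PySem.Dict.empty
  (PySem.List.enumerate sequence 0).filterMap (fun p =>
    if first.getD p.2 0 ≠ p.1 then some (p.1 - first.getD p.2 0 - 1) else none)

-- ===== PRECONDITION & SPEC =====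
def Spec_infer_trial_isis (sequence : List String) (out : List Int) : Prop := out = infer_trial_isis_alt sequence
instance (sequence : List String) (out : List Int) : Decidable (Spec_infer_trial_isis sequence out) := by unfold Spec_infer_trial_isis; infer_instance

-- ===== CLAIM (what is proved, stated in full; the proofs are below) =====
def Claim_equal_infer_trial_isis : Prop := ∀ (sequence : List String), Dom_infer_trial_isis sequence → Spec_infer_trial_isis sequence (infer_trial_isis sequence)

-- ===== LEMMAS AND PROOFS =====

def first? (ps : List (Int × String)) (s : String) : Option Int :=
  (ps.find? (fun p => p.2 == s)).map Prod.fst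

theorem aux_cons_some (i : Int) (stim : String) (rest : List (Int × String))
    (seen : PySem.Dict String Int) (acc : List Int) (v : Int) (h : seen.get? stim = some v) :
    infer_trial_isis_aux ((i, stim) :: rest) seen acc =
      infer_trial_isis_aux rest seen (acc ++ [i - v - 1]) := by
  simp [infer_trial_isis_aux, h]

theorem aux_cons_none (i : Int) (stim : String) (rest : List (Int × String))
    (seen : PySem.Dict String Int) (acc : List Int) (h : seen.get? stim = none) :
    infer_trial_isis_aux ((i, stim) :: rest) seen acc =
      infer_trial_isis_aux rest (seen.insert stim i) acc := by
  simp [infer_trial_isis_aux, h]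

theorem buildFirst_get? (ps : List (Int × String)) (d : PySem.Dict String Int) (s : String) :
    (buildFirst ps d).get? s = ((d.get? s).orElse (fun _ => first? ps s)) := by
  induction ps generalizing d with
  | nil => cases h : d.get? s <;> simp [buildFirst, first?, h]
  | cons p rest ih =>
    obtain ⟨i, t⟩ := p
    simp only [buildFirst]
    rw [ih]
    by_cases hc : d.contains t
    · simp only [hc, if_true]
      have hsome : (d.get? t).isSome := by rw [← PySem.Dict.contains_eq_isSome_get?, hc]
      by_cases hts : t = s
      · subst hts
        obtain ⟨v, hv⟩ := Option.isSome_iff_exists.mp hsome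
        simp [hv, first?]
      · cases h : d.get? s <;> simp [h, first?, hts]
    · simp only [hc, if_false, Bool.false_eq_true]
      have hnone : d.get? t = none := by
        cases h : d.get? t with
        | none => rfl
        | some v => exact absurd (by rw [PySem.Dict.contains_eq_isSome_get?, h]; rfl) hc
      by_cases hts : t = s
      · subst hts
        rw [PySem.Dict.get?_insert_self]
        simp [hnone, first?]
      · rw [PySem.Dict.get?_insert]
        simp only [if_neg (Ne.symm hts)]
        cases h : d.get? s <;> simp [h, first?, hts]

theorem first?_append (ps qs : List (Int × String)) (s : String) :
    first? (ps ++ qs) s = ((first? ps s).orElse (fun _ => first? qs s)) := by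
  simp only [first?, List.find?_append]
  cases h : List.find? (fun p => p.2 == s) ps <;> simp [h]

theorem first?_cons_self (i : Int) (s : String) (rest : List (Int × String)) :
    first? ((i, s) :: rest) s = some i := by
  simp [first?, List.find?]

theorem first?_enumerate_bound (pre : List String) (s : String) (v : Int)
    (h : first? (PySem.List.enumerate pre 0) s = some v) : 0 ≤ v ∧ v < (pre.length : Int) := by
  simp only [first?, Option.map_eq_some_iff] at h
  obtain ⟨p, hp, hv⟩ := h
  have hmem := List.mem_of_find?_eq_some hp
  rw [PySem.List.mem_enumerate_iff] at hmem
  obtain ⟨k, hk, hpk⟩ := hmem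
  subst hpk
  simp only at hv
  omega

theorem aux_eq_filterMap (xs pre : List String) (seen : PySem.Dict String Int) (acc : List Int)
    (hinv : ∀ s, seen.get? s = first? (PySem.List.enumerate pre 0) s) :
    infer_trial_isis_aux (PySem.List.enumerate xs (pre.length : Int)) seen acc =
      acc ++ (PySem.List.enumerate xs (pre.length : Int)).filterMap (fun p =>
        if (buildFirst (PySem.List.enumerate (pre ++ xs) 0) PySem.Dict.empty).getD p.2 0 ≠ p.1
        then some (p.1 - (buildFirst (PySem.List.enumerate (pre ++ xs) 0) PySem.Dict.empty).getD p.2 0 - 1)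
        else none) := by
  induction xs generalizing pre seen acc with
  | nil => simp [PySem.List.enumerate_nil, infer_trial_isis_aux]
  | cons s t ih =>
    rw [PySem.List.enumerate_cons]
    have hF : (buildFirst (PySem.List.enumerate (pre ++ s :: t) 0) PySem.Dict.empty).get? s =
        ((first? (PySem.List.enumerate pre 0) s).orElse
          (fun _ => some (pre.length : Int))) := by
      rw [buildFirst_get?, PySem.List.enumerate_append]
      simp only [PySem.Dict.get?_empty]
      rw [first?_append, PySem.List.enumerate_cons, first?_cons_self]
      cases hf : first? (PySem.List.enumerate pre 0) s <;> simp [hf]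
    have hpre1 : ((pre ++ [s]).length : Int) = (pre.length : Int) + 1 := by
      simp
    have hassoc : pre ++ s :: t = (pre ++ [s]) ++ t := by simp
    have hsingle : ∀ u : String, u ≠ s →
        first? (PySem.List.enumerate [s] (0 + (pre.length : Int))) u = none := by
      intro u hu
      simp [first?, List.find?, PySem.List.enumerate_cons, PySem.List.enumerate_nil,
        Ne.symm hu]
    cases hseen : seen.get? s with
    | some v =>
      have hfp : first? (PySem.List.enumerate pre 0) s = some v := by rw [← hinv s, hseen]
      have hFv : (buildFirst (PySem.List.enumerate (pre ++ s :: t) 0) PySem.Dict.empty).get? s = some v := by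
        rw [hF, hfp]; rfl
      have hgetD : (buildFirst (PySem.List.enumerate (pre ++ s :: t) 0) PySem.Dict.empty).getD s 0 = v := by
        rw [PySem.Dict.getD_eq_get?_getD, hFv]; rfl
      have hb := first?_enumerate_bound pre s v hfp
      have hne : v ≠ (pre.length : Int) := by omega
      have hinv' : ∀ u, seen.get? u = first? (PySem.List.enumerate (pre ++ [s]) 0) u := by
        intro u
        rw [PySem.List.enumerate_append, first?_append, hinv u]
        by_cases hus : u = s
        · subst hus; rw [hfp]; rfl
        · rw [hsingle u hus]
          cases hu : first? (PySem.List.enumerate pre 0) u <;> rfl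
      rw [aux_cons_some _ _ _ _ _ _ hseen]
      have := ih (pre ++ [s]) seen (acc ++ [(pre.length : Int) - v - 1]) hinv'
      rw [hpre1, ← hassoc] at this
      rw [this, List.filterMap_cons]
      simp only [hgetD, hne, ne_eq, not_false_eq_true, if_true, List.append_assoc,
        List.singleton_append]
    | none =>
      have hfp : first? (PySem.List.enumerate pre 0) s = none := by rw [← hinv s, hseen]
      have hFv : (buildFirst (PySem.List.enumerate (pre ++ s :: t) 0) PySem.Dict.empty).get? s
          = some (pre.length : Int) := by rw [hF, hfp]; rfl
      have hgetD : (buildFirst (PySem.List.enumerate (pre ++ s :: t) 0) PySem.Dict.empty).getD s 0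
          = (pre.length : Int) := by rw [PySem.Dict.getD_eq_get?_getD, hFv]; rfl
      have hinv' : ∀ u, (seen.insert s (pre.length : Int)).get? u =
          first? (PySem.List.enumerate (pre ++ [s]) 0) u := by
        intro u
        rw [PySem.List.enumerate_append, first?_append]
        by_cases hus : u = s
        · subst hus
          rw [PySem.Dict.get?_insert_self, hfp]
          simp [first?, List.find?, PySem.List.enumerate_cons, PySem.List.enumerate_nil]
        · rw [PySem.Dict.get?_insert]
          simp only [if_neg hus]
          rw [hinv u, hsingle u hus]
          cases hu : first? (PySem.List.enumerate pre 0) u <;> rfl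
      rw [aux_cons_none _ _ _ _ _ hseen]
      have := ih (pre ++ [s]) (seen.insert s (pre.length : Int)) acc hinv'
      rw [hpre1, ← hassoc] at this
      rw [this, List.filterMap_cons]
      simp only [hgetD, ne_eq, not_true_eq_false, if_false]

-- ===== VERDICT (by name: the statement is the Claim_ definition above) =====
theorem infer_trial_isis_spec : Claim_equal_infer_trial_isis := by
  intro sequence _
  unfold Spec_infer_trial_isis infer_trial_isis infer_trial_isis_alt
  have h := aux_eq_filterMap sequence [] PySem.Dict.empty []
    (by intro s; simp [first?, PySem.List.enumerate_nil])
  simpa using h
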